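-- pv_equiv track=rewrite | github.com/matrochanowski/elevator-project | simulation/utils.py | extract_params_suffix
-- ===== SOURCE A (Python) =====
-- from typing import Tuple
--
-- def extract_params_suffix(filename: str) -> Tuple[int, int]:
--     """
--     :param filename: whole filename (with .pkl extension).
--     :return: number of elevators, number of floors
--     """
--     n_floors_str = ""
--     elevators_done_flag = False
--     n_elevators_str = ""
--     floors_done_flag = False
--     for i in range(len(filename) - 4, 0, -1):
--         if i == 0:
--             n_floors_str = filename[i - 1]
--             continue
--         if not floors_done_flag:
--             if filename[i - 1] == "_":
--                 floors_done_flag = True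
--                 continue
--             n_floors_str = filename[i - 1] + n_floors_str
--             continue
--         if not elevators_done_flag:
--             if filename[i - 1] == "_":
--                 elevators_done_flag = True
--                 continue
--             n_elevators_str = filename[i - 1] + n_elevators_str
--
--     try:
--         n_elevators = int(n_elevators_str)
--     except ValueError:
--         return 0, 0
--     try:
--         n_floors = int(n_floors_str)
--     except ValueError:
--         return 0, 0
--     return n_elevators, n_floors
-- ===== SOURCE B (Python) =====
-- def extract_params_suffix(filename):
--     """
--     :param filename: whole filename (with .pkl extension).
--     :return: number of elevators, number of floors
--     """
--     segments = filename[:-4].split("_")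
--     n_floors_str = segments[-1]
--     n_elevators_str = segments[-2] if len(segments) >= 2 else ""
--     try:
--         n_elevators = int(n_elevators_str)
--     except ValueError:
--         return 0, 0
--     try:
--         n_floors = int(n_floors_str)
--     except ValueError:
--         return 0, 0
--     return n_elevators, n_floors
-- ===== Notes on version B (the rewrite author's own statement) =====
-- stated objective: simpler
-- what changed: Replaces A's backward char-by-char scan with its four mutable state variables (two strings grown by repeated prepending, two done-flags) by slicing off the 4-char extension and splitting the core on the underscore separator, then reading the last and second-to-last segments directly; the int conversions and the (0,0) ValueError fallback are kept.
import Mathlib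
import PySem

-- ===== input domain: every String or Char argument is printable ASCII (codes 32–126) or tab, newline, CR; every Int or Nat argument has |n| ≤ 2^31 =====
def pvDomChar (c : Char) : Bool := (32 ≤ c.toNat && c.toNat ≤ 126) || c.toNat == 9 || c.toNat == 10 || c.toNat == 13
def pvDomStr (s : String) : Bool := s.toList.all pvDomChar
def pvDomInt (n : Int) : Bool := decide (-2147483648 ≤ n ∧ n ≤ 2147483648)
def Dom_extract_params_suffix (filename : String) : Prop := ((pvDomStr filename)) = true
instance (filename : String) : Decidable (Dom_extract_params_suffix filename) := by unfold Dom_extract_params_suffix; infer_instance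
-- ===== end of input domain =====

-- B replaces A's backward char-by-char scan (four-variable flag state machine) with a split of filename[:-4] on "_" and
-- indexing the last two segments; objective: simpler.

-- ===== PORT A =====
-- state = (n_floors_str, floors_done_flag, n_elevators_str, elevators_done_flag); Python strings built char by char as List Char.
-- pyGetD's default ' ' is never used: the loop index i ranges over len-4 .. 1, so i-1 is always in range.
def extract_params_suffix (filename : String) : Int × Int :=
  let cs := filename.toList
  let st := (PySem.List.pyRange ((cs.length : Int) - 4) 0 (-1)).foldl
    (fun (st : List Char × Bool × List Char × Bool) (i : Int) =>
      if i == 0 then ([PySem.List.pyGetD cs (i - 1) ' '], st.2.1, st.2.2.1, st.2.2.2)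
      else if !st.2.1 then
        if PySem.List.pyGetD cs (i - 1) ' ' == '_' then (st.1, true, st.2.2.1, st.2.2.2)
        else (PySem.List.pyGetD cs (i - 1) ' ' :: st.1, st.2.1, st.2.2.1, st.2.2.2)
      else if !st.2.2.2 then
        if PySem.List.pyGetD cs (i - 1) ' ' == '_' then (st.1, st.2.1, st.2.2.1, true)
        else (st.1, st.2.1, PySem.List.pyGetD cs (i - 1) ' ' :: st.2.2.1, st.2.2.2)
      else st)
    ([], false, [], false)
  match PySem.Int.ofChars? st.2.2.1 with
  | none => (0, 0)
  | some nElev =>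
    match PySem.Int.ofChars? st.1 with
    | none => (0, 0)
    | some nFloors => (nElev, nFloors)

-- ===== PORT B =====
-- segments[-1] / segments[-2]: split never returns an empty list and the [-2] access is guarded, so the pyGetD default [] is never used.
def extract_params_suffix_alt (filename : String) : Int × Int :=
  let segments := PySem.Chars.splitOn (PySem.List.slice filename.toList none (some (-4))) ['_']
  let n_floors_str := PySem.List.pyGetD segments (-1) []
  let n_elevators_str := if 2 ≤ (segments.length : Int) then PySem.List.pyGetD segments (-2) [] else []
  match PySem.Int.ofChars? n_elevators_str with
  | none => (0, 0)
  | some nElev =>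
    match PySem.Int.ofChars? n_floors_str with
    | none => (0, 0)
    | some nFloors => (nElev, nFloors)

-- ===== PRECONDITION & SPEC =====
def Spec_extract_params_suffix (filename : String) (out : Int × Int) : Prop := out = extract_params_suffix_alt filename
instance (filename : String) (out : Int × Int) : Decidable (Spec_extract_params_suffix filename out) := by unfold Spec_extract_params_suffix; infer_instance

-- ===== CLAIM (what is proved, stated in full; the proofs are below) =====
def Claim_equal_extract_params_suffix : Prop := ∀ (filename : String), Dom_extract_params_suffix filename → Spec_extract_params_suffix filename (extract_params_suffix filename)

-- ===== LEMMAS AND PROOFS =====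

-- A's loop body with the dead `i == 0` branch removed, as a function of the scanned character.
def pvStep (st : List Char × Bool × List Char × Bool) (c : Char) : List Char × Bool × List Char × Bool :=
  if !st.2.1 then
    if c == '_' then (st.1, true, st.2.2.1, st.2.2.2)
    else (c :: st.1, st.2.1, st.2.2.1, st.2.2.2)
  else if !st.2.2.2 then
    if c == '_' then (st.1, st.2.1, st.2.2.1, true)
    else (st.1, st.2.1, c :: st.2.2.1, st.2.2.2)
  else st

-- structural recursion equivalent of s.split("_")
def pvSplit : List Char → List (List Char)
  | [] => [[]]
  | c :: l => if c = '_' then [] :: pvSplit l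
              else (c :: (pvSplit l).headD []) :: (pvSplit l).tail

-- last and second-to-last segment ([] when absent)
def pvLast : List (List Char) → List Char
  | [] => []
  | [s] => s
  | _ :: s :: t => pvLast (s :: t)

def pvPen : List (List Char) → List Char
  | [] => []
  | [_] => []
  | [s, _] => s
  | _ :: s :: t :: u => pvPen (s :: t :: u)

theorem pvSplit_ne_nil (l : List Char) : pvSplit l ≠ [] := by
  cases l with
  | nil => simp [pvSplit]
  | cons c l => simp only [pvSplit]; split_ifs with h <;> simp

theorem pv_go_eq (fuel : Nat) : ∀ (l cur : List Char) (acc : List (List Char)),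
    l.length ≤ fuel →
    PySem.Chars.splitOn.go ['_'] fuel l cur acc =
      acc.reverse ++ (cur.reverse ++ (pvSplit l).headD []) :: (pvSplit l).tail := by
  induction fuel with
  | zero =>
    intro l cur acc h
    have : l = [] := by cases l <;> simp_all
    subst this
    simp [PySem.Chars.splitOn.go, pvSplit]
  | succ f ih =>
    intro l cur acc h
    cases l with
    | nil => simp [PySem.Chars.splitOn.go, pvSplit]
    | cons c rest =>
      by_cases hc : c = '_'
      · subst hc
        rw [show PySem.Chars.splitOn.go ['_'] (f+1) ('_' :: rest) cur acc
            = PySem.Chars.splitOn.go ['_'] f rest [] (cur.reverse :: acc) from by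
          simp [PySem.Chars.splitOn.go, List.isPrefixOf]]
        rw [ih rest [] (cur.reverse :: acc) (by simpa using Nat.lt_succ_iff.mp (by simpa using h))]
        obtain ⟨s0, t, hs⟩ : ∃ s0 t, pvSplit rest = s0 :: t := by
          rcases hl : pvSplit rest with _ | ⟨s0, t⟩
          · exact absurd hl (pvSplit_ne_nil rest)
          · exact ⟨s0, t, rfl⟩
        simp [pvSplit, hs]
      · rw [show PySem.Chars.splitOn.go ['_'] (f+1) (c :: rest) cur acc
            = PySem.Chars.splitOn.go ['_'] f rest (c :: cur) acc from by
          simp only [PySem.Chars.splitOn.go, List.isPrefixOf, Bool.and_eq_true, beq_iff_eq]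
          rw [if_neg]
          rintro ⟨h', -⟩; exact hc h'.symm]
        rw [ih rest (c :: cur) acc (by simpa using Nat.lt_succ_iff.mp (by simpa using h))]
        simp [pvSplit, hc]

theorem pv_splitOn_eq (l : List Char) : PySem.Chars.splitOn l ['_'] = pvSplit l := by
  rw [PySem.Chars.splitOn, pv_go_eq (l.length + 1) l [] [] (by omega)]
  obtain ⟨s0, t, hs⟩ : ∃ s0 t, pvSplit l = s0 :: t := by
    rcases hl : pvSplit l with _ | ⟨s0, t⟩
    · exact absurd hl (pvSplit_ne_nil l)
    · exact ⟨s0, t, rfl⟩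
  simp [hs]

-- A's backward scan, read off the split segments
theorem pv_foldr_step (l : List Char) :
    l.foldr (fun c st => pvStep st c) ([], false, [], false) =
      (pvLast (pvSplit l), decide (2 ≤ (pvSplit l).length),
       pvPen (pvSplit l), decide (3 ≤ (pvSplit l).length)) := by
  induction l with
  | nil => simp [pvSplit, pvLast, pvPen]
  | cons c l ih =>
    rw [List.foldr_cons, ih]
    rcases hs : pvSplit l with _ | ⟨s0, _ | ⟨s1, _ | ⟨s2, t⟩⟩⟩
    · exact absurd hs (pvSplit_ne_nil l)
    · by_cases hc : c = '_' <;> simp [pvSplit, hs, hc, pvStep, pvLast, pvPen]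
    · by_cases hc : c = '_' <;> simp [pvSplit, hs, hc, pvStep, pvLast, pvPen]
    · by_cases hc : c = '_' <;> simp [pvSplit, hs, hc, pvStep, pvLast, pvPen]

theorem pv_map_range (cs : List Char) (k : Nat) (h : k ≤ cs.length) :
    (PySem.List.pyRange (k : Int) 0 (-1)).map (fun i => PySem.List.pyGetD cs (i - 1) ' ') =
      (cs.take k).reverse := by
  induction k with
  | zero => simp [PySem.List.pyRange_neg_one_eq_nil]
  | succ k ih =>
    rw [PySem.List.pyRange_neg_one_cons (by exact_mod_cast Nat.succ_pos k)]
    have hk : k < cs.length := by omega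
    have h1 : ((k + 1 : Nat) : Int) - 1 = (k : Int) := by push_cast; ring
    rw [List.map_cons, h1, ih (by omega)]
    rw [PySem.List.pyGetD_natCast]
    rw [List.take_add_one, List.reverse_append]
    simp [List.getD, hk]

theorem pv_slice_eq (cs : List Char) :
    PySem.List.slice cs none (some (-4)) = cs.take (((cs.length : Int) - 4).toNat) := by
  simp [PySem.List.slice, PySem.List.clampIdx]
  split_ifs with h1 <;> omega

theorem pv_getElem?_neg (L : List (List Char)) (j : Nat) (hj : j < L.length) :
    PySem.List.pyGetD L (-(((L.length : Int)) - j)) [] = L[j]?.getD [] := by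
  simp only [PySem.List.pyGetD, PySem.List.pyGet?, PySem.List.pyIdx?]
  have h1 : ¬ (0:Int) ≤ -((L.length : Int) - j) := by omega
  have h2 : -((L.length : Int)) ≤ -((L.length : Int) - j) := by omega
  rw [if_neg h1, if_pos h2]
  have : L.length - (-(-((L.length : Int) - j))).toNat = j := by omega
  rw [this]
  rfl

theorem pvLast_eq (L : List (List Char)) (h : L ≠ []) :
    pvLast L = L[L.length - 1]?.getD [] := by
  induction L with
  | nil => simp at h
  | cons a t ih =>
    cases t with
    | nil => simp [pvLast]
    | cons b u =>
      rw [show pvLast (a :: b :: u) = pvLast (b :: u) from rfl, ih (by simp)]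
      have : (a :: b :: u).length - 1 = ((b :: u).length - 1) + 1 := by simp
      rw [this, List.getElem?_cons_succ]

theorem pvPen_eq (L : List (List Char)) (h : 2 ≤ L.length) :
    pvPen L = L[L.length - 2]?.getD [] := by
  induction L with
  | nil => simp at h
  | cons a t ih =>
    cases t with
    | nil => simp at h
    | cons b u =>
      cases u with
      | nil => simp [pvPen]
      | cons c v =>
        rw [show pvPen (a :: b :: c :: v) = pvPen (b :: c :: v) from rfl, ih (by simp)]
        have : (a :: b :: c :: v).length - 2 = ((b :: c :: v).length - 2) + 1 := by simp
        rw [this, List.getElem?_cons_succ]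

theorem pv_pyGetD_neg_one (L : List (List Char)) (h : L ≠ []) :
    PySem.List.pyGetD L (-1) [] = pvLast L := by
  have hl : 0 < L.length := List.length_pos_iff.mpr h
  have := pv_getElem?_neg L (L.length - 1) (by omega)
  rw [pvLast_eq L h, ← this]
  congr 1
  omega

theorem pv_pyGetD_neg_two (L : List (List Char)) (h : 2 ≤ L.length) :
    PySem.List.pyGetD L (-2) [] = pvPen L := by
  have := pv_getElem?_neg L (L.length - 2) (by omega)
  rw [pvPen_eq L h, ← this]
  congr 1
  omega

theorem pv_main (filename : String) :
    extract_params_suffix filename = extract_params_suffix_alt filename := by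
  unfold extract_params_suffix extract_params_suffix_alt
  dsimp only
  set cs := filename.toList with hcs
  set a : Int := (cs.length : Int) - 4 with ha
  -- A's fold over indices is the fold of pvStep over the reversed core
  have hcong : (PySem.List.pyRange a 0 (-1)).foldl
      (fun (st : List Char × Bool × List Char × Bool) (i : Int) =>
        if i == 0 then ([PySem.List.pyGetD cs (i - 1) ' '], st.2.1, st.2.2.1, st.2.2.2)
        else if !st.2.1 then
          if PySem.List.pyGetD cs (i - 1) ' ' == '_' then (st.1, true, st.2.2.1, st.2.2.2)
          else (PySem.List.pyGetD cs (i - 1) ' ' :: st.1, st.2.1, st.2.2.1, st.2.2.2)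
        else if !st.2.2.2 then
          if PySem.List.pyGetD cs (i - 1) ' ' == '_' then (st.1, st.2.1, st.2.2.1, true)
          else (st.1, st.2.1, PySem.List.pyGetD cs (i - 1) ' ' :: st.2.2.1, st.2.2.2)
        else st)
      ([], false, [], false)
    = (PySem.List.pyRange a 0 (-1)).foldl
        (fun st i => pvStep st (PySem.List.pyGetD cs (i - 1) ' ')) ([], false, [], false) := by
    refine PySem.List.foldl_congr_mem _ _ _ _ ?_
    intro acc i hi
    obtain ⟨h0, -⟩ := (PySem.List.mem_pyRange_neg_one).mp hi
    have hne : (i == 0) = false := by simp; omega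
    rw [hne]
    simp only [Bool.false_eq_true, if_false, pvStep]
  rw [hcong]
  have hmap : (PySem.List.pyRange a 0 (-1)).map (fun i => PySem.List.pyGetD cs (i - 1) ' ')
      = (cs.take a.toNat).reverse := by
    by_cases hA : a ≤ 0
    · rw [PySem.List.pyRange_neg_one_eq_nil hA]
      have h0 : a.toNat = 0 := by omega
      simp [h0]
    · have h1 : a = ((a.toNat : Nat) : Int) := by omega
      rw [h1]
      exact pv_map_range cs a.toNat (by omega)
  rw [← List.foldl_map (f := fun i => PySem.List.pyGetD cs (i - 1) ' ') (g := pvStep),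
      hmap, List.foldl_reverse, pv_foldr_step]
  -- B's segments are pvSplit of the same core
  rw [pv_slice_eq cs, ← ha, pv_splitOn_eq]
  set S := pvSplit (cs.take a.toNat) with hS
  have hSne : S ≠ [] := pvSplit_ne_nil _
  rw [pv_pyGetD_neg_one S hSne]
  by_cases h2 : 2 ≤ S.length
  · rw [if_pos (by exact_mod_cast h2), pv_pyGetD_neg_two S h2]
  · have h1 : S.length = 1 := by
      have := List.length_pos_iff.mpr hSne
      omega
    obtain ⟨s, hs⟩ := List.length_eq_one_iff.mp h1
    rw [if_neg (by exact_mod_cast h2), hs]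
    simp [pvPen]

-- ===== VERDICT (by name: the statement is the Claim_ definition above) =====
theorem extract_params_suffix_spec : Claim_equal_extract_params_suffix := by
  intro filename _
  unfold Spec_extract_params_suffix
  exact pv_main filename
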